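-- pv_equiv track=rewrite | github.com/struggling-student/PythonExercises | Eserciziario/5/program.py | es5_ric
-- ===== SOURCE A (Python) =====
-- def es5_ric(insieme, k, out):
--     if k == 1:
--         return out
--     else:
--         nuovo = set()
--         for a in insieme:
--             for b in out:
--                 nuovo.add(a+b)
--         return es5_ric(insieme, k-1, nuovo)
-- ===== SOURCE B (Python) =====
-- def es5_ric(insieme, k, out):
--     for _ in range(k - 1):
--         out = {a + b for a in insieme for b in out}
--     return out
-- ===== Notes on version B (the rewrite author's own statement) =====
-- stated objective: simpler
-- what changed: Replaces the tail recursion with a bounded for-loop over range(k-1), rebinding the accumulator with a set comprehension each round; Pre_ excludes k < 1 and k > 9000, where A's unbounded/deep recursion raises RecursionError (9000 is a conservative margin below the recursion limit, so a few very deep returning runs are excluded too), while B's loop still returns there.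
-- outside the precondition, e.g. on es5_ric({1}, 9500, {0}): A returns {9499}, B returns {9499}; on es5_ric({1}, 0, {5}): A raises RecursionError, B returns {5}
import Mathlib
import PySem

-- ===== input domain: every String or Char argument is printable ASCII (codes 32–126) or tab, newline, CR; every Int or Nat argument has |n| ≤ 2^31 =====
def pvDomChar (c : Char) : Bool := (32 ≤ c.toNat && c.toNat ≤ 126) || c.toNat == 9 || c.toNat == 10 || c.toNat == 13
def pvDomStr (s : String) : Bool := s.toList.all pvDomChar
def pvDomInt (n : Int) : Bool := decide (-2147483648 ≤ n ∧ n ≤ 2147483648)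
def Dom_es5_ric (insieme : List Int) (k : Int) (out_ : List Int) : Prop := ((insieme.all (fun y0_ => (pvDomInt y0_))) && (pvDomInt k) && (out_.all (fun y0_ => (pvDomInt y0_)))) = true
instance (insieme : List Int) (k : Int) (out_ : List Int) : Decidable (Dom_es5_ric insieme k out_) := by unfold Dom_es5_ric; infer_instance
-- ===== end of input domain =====

-- B replaces A's tail recursion with a bounded for-loop over range(k-1) (objective: simpler); for k < 1 A raises RecursionError while B returns out unchanged (excluded by Pre_).

-- ===== PORT A =====
-- Python's 'k == 1' base case; the 'k ≤ 1' guard only totalizes the k < 1 inputs,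
-- on which the Python recurses forever (excluded by Pre_es5_ric).
def es5_ric (insieme : List Int) (k : Int) (out_ : List Int) : List Int :=
  if _h : k ≤ 1 then out_
  else
    -- nuovo = set(); for a in insieme: for b in out: nuovo.add(a+b)
    es5_ric insieme (k - 1)
      (insieme.foldl (fun nuovo a => out_.foldl (fun nuovo b => PySem.Set.add nuovo (a + b)) nuovo)
        PySem.Set.empty)
termination_by k.toNat
decreasing_by omega

-- ===== PORT B =====
-- the set comprehension {a + b for a in insieme for b in out}
def pvSumset (insieme out : List Int) : List Int :=
  insieme.foldl (fun s a => out.foldl (fun s b => PySem.Set.add s (a + b)) s) PySem.Set.empty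

def es5_ric_alt (insieme : List Int) (k : Int) (out_ : List Int) : List Int :=
  (PySem.List.pyRange 0 (k - 1) 1).foldl (fun out _ => pvSumset insieme out) out_

-- ===== PRECONDITION & SPEC =====
-- Pre_ excludes k < 1 (A recurses without ever reaching a base case) and k > 9000 (A's recursion depth is k-1, which exceeds the interpreter recursion limit): on both A raises RecursionError; 9000 is a conservative margin below the limit, so a few very deep returning runs are excluded too.
def Pre_es5_ric (insieme : List Int) (k : Int) (out_ : List Int) : Prop := 1 ≤ k ∧ k ≤ 9000
instance (insieme : List Int) (k : Int) (out_ : List Int) : Decidable (Pre_es5_ric insieme k out_) := by unfold Pre_es5_ric; infer_instance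
def pvWitness_es5_ric : List Int × Int × List Int := ([1, 2], 3, [0, 5])

def Spec_es5_ric (insieme : List Int) (k : Int) (out_ : List Int) (out : List Int) : Prop := out = es5_ric_alt insieme k out_
instance (insieme : List Int) (k : Int) (out_ : List Int) (out : List Int) : Decidable (Spec_es5_ric insieme k out_ out) := by unfold Spec_es5_ric; infer_instance

-- ===== CLAIM (what is proved, stated in full; the proofs are below) =====
def Claim_equal_es5_ric : Prop := ∀ (insieme : List Int) (k : Int) (out_ : List Int), Dom_es5_ric insieme k out_ → Pre_es5_ric insieme k out_ → Spec_es5_ric insieme k out_ (es5_ric insieme k out_)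

-- ===== LEMMAS AND PROOFS =====

-- a foldl that ignores the list elements is iteration by the list's length
theorem pv_foldl_const {α β : Type} (g : β → β) : ∀ (l : List α) (init : β),
    l.foldl (fun o _ => g o) init = g^[l.length] init := by
  intro l
  induction l with
  | nil => intro init; rfl
  | cons x xs ih =>
      intro init
      simp [List.foldl, ih, Function.iterate_succ_apply]

theorem es5_ric_alt_eq_iterate (insieme : List Int) (k : Int) (out_ : List Int) :
    es5_ric_alt insieme k out_ = (pvSumset insieme)^[(k - 1).toNat] out_ := by
  unfold es5_ric_alt
  rw [pv_foldl_const, PySem.List.length_pyRange_one]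
  norm_num

theorem es5_ric_eq_iterate (insieme : List Int) : ∀ (n : Nat) (k : Int) (out_ : List Int),
    k.toNat = n → 1 ≤ k → es5_ric insieme k out_ = (pvSumset insieme)^[(k - 1).toNat] out_ := by
  intro n
  induction n with
  | zero => intro k out_ hk h1; omega
  | succ m ih =>
      intro k out_ hk h1
      rw [es5_ric]
      by_cases h : k ≤ 1
      · have : k = 1 := le_antisymm h h1
        subst this
        simp
      · simp only [dif_neg h]
        rw [ih (k - 1) _ (by omega) (by omega)]
        have h2 : (k - 1).toNat = (k - 1 - 1).toNat + 1 := by omega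
        rw [h2, Function.iterate_succ_apply]
        rfl

-- ===== VERDICT (by name: the statement is the Claim_ definition above) =====
theorem es5_ric_spec : Claim_equal_es5_ric := by
  intro insieme k out_ _ hpre
  unfold Spec_es5_ric
  rw [es5_ric_eq_iterate insieme k.toNat k out_ rfl hpre.1, es5_ric_alt_eq_iterate]
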